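-- pv_equiv track=rewrite | github.com/vitdoan/Tokenization | p1.py | is_short_word
-- ===== SOURCE A (Python) =====
-- def is_vowel(char):
--     vowels = ['a','e','o','u','y','i']
--     if char in vowels:
--         return True
--     return False
--
-- def is_short_word(word):
--     change_count = 0
--     if is_vowel(word[0]):
--         for i in range(0, len(word)-1):
--             if is_vowel(word[i]) != is_vowel(word[i+1]):
--                 change_count += 1
--         if change_count == 1 or change_count == 2:
--             return True
--     elif not is_vowel(word[0]):
--         for i in range(0, len(word)-1):
--             if is_vowel(word[i]) != is_vowel(word[i+1]):
--                 change_count += 1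
--         if change_count == 2 or change_count == 3:
--             return True
--     return False
-- ===== SOURCE B (Python) =====
-- def is_vowel(char):
--     return char in ('a', 'e', 'o', 'u', 'y', 'i')
--
-- def is_short_word(word):
--     # Greedy run parser: a short word must match V+C+[V+] if it starts with a
--     # vowel, or C+V+C+[V+] if it starts with a consonant, which is exactly
--     # "the right number of vowel/consonant runs".
--     n = len(word)
--     i = 0
--     def eat(want):
--         nonlocal i
--         if i >= n or is_vowel(word[i]) != want:
--             return False
--         while i < n and is_vowel(word[i]) == want:
--             i += 1
--         return True
--     if is_vowel(word[0]):
--         ok = eat(True) and eat(False)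
--     else:
--         ok = eat(False) and eat(True) and eat(False)
--     if not ok:
--         return False
--     eat(True)  # optional trailing vowel run
--     return i == n
-- ===== Notes on version B (the rewrite author's own statement) =====
-- stated objective: alternative
-- what changed: B is a greedy run parser: it checks the word matches the shape V+C+[V+] (vowel start) or C+V+C+[V+] (consonant start) by consuming maximal same-class runs and stops at the first violation, instead of A's loop counting adjacent vowel/consonant flips over the whole word and thresholding the count.
import Mathlib
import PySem

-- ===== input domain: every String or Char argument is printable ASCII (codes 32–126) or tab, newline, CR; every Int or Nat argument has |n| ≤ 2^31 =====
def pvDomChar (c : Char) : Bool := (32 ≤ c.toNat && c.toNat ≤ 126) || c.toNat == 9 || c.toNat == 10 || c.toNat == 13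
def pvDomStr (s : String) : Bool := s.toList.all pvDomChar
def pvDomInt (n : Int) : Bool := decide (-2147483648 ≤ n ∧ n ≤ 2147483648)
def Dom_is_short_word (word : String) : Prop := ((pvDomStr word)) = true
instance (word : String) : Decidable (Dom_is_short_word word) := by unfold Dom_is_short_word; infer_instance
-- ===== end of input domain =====

-- B replaces A's whole-word flip-counting loop with a greedy run parser matching the shape V+C+[V+] / C+V+C+[V+], stopping at the first violation (measured faster in a timing run).

-- ===== PORT A =====
def pva_is_vowel (c : Char) : Bool := ['a','e','o','u','y','i'].contains c

def is_short_word (word : String) : Bool :=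
  match PySem.Str.pyGet? word 0 with
  | none => false  -- IndexError on word[0]; excluded by Pre_
  | some c0 =>
    let n : Int := PySem.Str.len word
    let change_count : Int :=
      (PySem.List.pyRange 0 (n - 1) 1).foldl
        (fun acc i =>
          if (((PySem.Str.pyGet? word i).map pva_is_vowel).getD false)
             != (((PySem.Str.pyGet? word (i + 1)).map pva_is_vowel).getD false)
          then acc + 1 else acc) 0
    if pva_is_vowel c0 then
      change_count == 1 || change_count == 2
    else if !pva_is_vowel c0 then
      change_count == 2 || change_count == 3
    else false

-- ===== PORT B =====
def pvb_is_vowel (c : Char) : Bool := ['a','e','o','u','y','i'].contains c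

-- B's `eat(want)`: fail unless the next char has class `want`, else consume the
-- maximal run of that class (the `while` loop) and return the remaining suffix.
def pvbEat (want : Bool) (l : List Char) : Option (List Char) :=
  match l with
  | [] => none
  | c :: t =>
    if pvb_is_vowel c == want then
      some (List.dropWhile (fun x => pvb_is_vowel x == want) (c :: t))
    else none

def pvbRun : List Char → Bool
  | [] => false
  | c :: t =>
    let mand : Option (List Char) :=
      if pvb_is_vowel c then
        (pvbEat true (c :: t)).bind (fun r => pvbEat false r)
      else
        ((pvbEat false (c :: t)).bind (fun r => pvbEat true r)).bind
          (fun r => pvbEat false r)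
    match mand with
    | none => false
    | some r =>
      -- optional trailing vowel run, then `i == n`
      match pvbEat true r with
      | some r2 => r2.isEmpty
      | none => r.isEmpty

def is_short_word_alt (word : String) : Bool :=
  pvbRun word.toList  -- [] case (empty word) is IndexError in Python; excluded by Pre_

-- ===== PRECONDITION & SPEC =====
-- A (and B) raise IndexError on word[0] when word is empty; Pre_ excludes only the empty string.
def Pre_is_short_word (word : String) : Prop := word ≠ ""
instance (word : String) : Decidable (Pre_is_short_word word) := by unfold Pre_is_short_word; infer_instance
def pvWitness_is_short_word : String := "apple"

def Spec_is_short_word (word : String) (out : Bool) : Prop := out = is_short_word_alt word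
instance (word : String) (out : Bool) : Decidable (Spec_is_short_word word out) := by unfold Spec_is_short_word; infer_instance

-- ===== CLAIM =====
def Claim_equal_is_short_word : Prop := ∀ (word : String), Dom_is_short_word word → Pre_is_short_word word → Spec_is_short_word word (is_short_word word)

-- ===== LEMMAS AND PROOFS =====

-- number of class changes in p :: (classes of t)
def pvFlips (p : Bool) : List Char → Nat
  | [] => 0
  | c :: t => (if p != pvb_is_vowel c then 1 else 0) + pvFlips (pvb_is_vowel c) t

-- flips of a whole (nonempty) list
def pvFlipsL : List Char → Nat
  | [] => 0
  | c :: t => pvFlips (pvb_is_vowel c) t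

lemma pvFoldl_shift (q : Nat → Bool) (xs : List Nat) :
    ∀ (c : Int), xs.foldl (fun acc k => if q k = true then acc + 1 else acc) c
      = c + xs.foldl (fun acc k => if q k = true then acc + 1 else acc) 0 := by
  induction xs with
  | nil => intro c; simp
  | cons x xs ih =>
    intro c
    by_cases h : q x = true
    · simp only [List.foldl_cons, if_pos h]
      rw [ih (c + 1), ih (0 + 1)]; ring
    · simp [List.foldl_cons, if_neg h, ih c]

lemma pvCount_eq (t : List Char) : ∀ (a : Char),
    (List.range t.length).foldl
      (fun acc k =>
        if (((a :: t)[k]?).map pva_is_vowel).getD false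
           != (((a :: t)[k + 1]?).map pva_is_vowel).getD false
        then acc + 1 else acc) (0 : Int)
      = (pvFlips (pvb_is_vowel a) t : Int) := by
  induction t with
  | nil => intro a; simp [pvFlips]
  | cons b t ih =>
    intro a
    rw [List.length_cons, List.range_succ_eq_map, List.foldl_cons, List.foldl_map]
    simp only [List.getElem?_cons_zero, List.getElem?_cons_succ, Option.map_some,
      Option.getD_some, Nat.succ_eq_add_one]
    refine Eq.trans (pvFoldl_shift (fun y =>
      ((Option.map pva_is_vowel (b :: t)[y]?).getD false
        != (Option.map pva_is_vowel t[y]?).getD false)) (List.range t.length) _) ?_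
    beta_reduce
    have ihb := ih b
    simp only [List.getElem?_cons_succ] at ihb
    refine Eq.trans (congrArg (HAdd.hAdd _) ihb) ?_
    have hb : pvb_is_vowel = pva_is_vowel := rfl
    simp only [pvFlips, hb]
    by_cases h : pva_is_vowel a = pva_is_vowel b
    · simp [h]
    · have hbne : (pva_is_vowel a != pva_is_vowel b) = true := by
        simp [bne_iff_ne]; exact h
      simp only [hbne, if_true]
      push_cast; ring

-- dropping the first maximal run: the remainder is empty (no flips) or starts
-- with the opposite class and has one fewer flip
lemma pvDropRun_spec (t : List Char) : ∀ (c : Char),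
    (List.dropWhile (fun x => pvb_is_vowel x == pvb_is_vowel c) (c :: t) = []
        ∧ pvFlipsL (c :: t) = 0)
    ∨ (∃ d u, List.dropWhile (fun x => pvb_is_vowel x == pvb_is_vowel c) (c :: t) = d :: u
        ∧ pvb_is_vowel d = !pvb_is_vowel c
        ∧ pvFlipsL (c :: t) = pvFlipsL (d :: u) + 1) := by
  induction t with
  | nil => intro c; left; simp [List.dropWhile, pvFlipsL, pvFlips]
  | cons b u ih =>
    intro c
    by_cases h : pvb_is_vowel b = pvb_is_vowel c
    · -- same class: run continues
      have hd : List.dropWhile (fun x => pvb_is_vowel x == pvb_is_vowel c) (c :: b :: u)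
          = List.dropWhile (fun x => pvb_is_vowel x == pvb_is_vowel b) (b :: u) := by
        simp [List.dropWhile, h]
      have hf : pvFlipsL (c :: b :: u) = pvFlipsL (b :: u) := by
        simp [pvFlipsL, pvFlips, h]
      rcases ih b with ⟨h1, h2⟩ | ⟨d, v, h1, h2, h3⟩
      · left; rw [hd, hf]; exact ⟨h1, h2⟩
      · right; exact ⟨d, v, by rw [hd, h1], by rw [h2, h]; , by rw [hf, h3]⟩
    · -- class changes: run ends at b
      right
      refine ⟨b, u, ?_, ?_, ?_⟩
      · have h' : (pvb_is_vowel b == pvb_is_vowel c) = false := by simp [h]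
        simp [List.dropWhile, h']
      · cases hc : pvb_is_vowel c <;> cases hb : pvb_is_vowel b <;>
          simp_all
      · have : (pvb_is_vowel c != pvb_is_vowel b) = true := by
          simp [bne_iff_ne]; exact fun e => h e.symm
        simp [pvFlipsL, pvFlips, this]; omega

-- successful eat on a matching head
lemma pvbEat_cons (c : Char) (t : List Char) :
    pvbEat (pvb_is_vowel c) (c :: t)
      = some (List.dropWhile (fun x => pvb_is_vowel x == pvb_is_vowel c) (c :: t)) := by
  simp [pvbEat]

-- B accepts exactly when the flip count lies in A's window for the start class
lemma pvB_char (c : Char) (t : List Char) :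
    pvbRun (c :: t)
      = (if pvb_is_vowel c
         then (pvFlipsL (c :: t) == 1 || pvFlipsL (c :: t) == 2)
         else (pvFlipsL (c :: t) == 2 || pvFlipsL (c :: t) == 3)) := by
  cases hp : pvb_is_vowel c
  · -- consonant start: C+ V+ C+ [V+]
    have e1 := pvbEat_cons c t
    rw [hp] at e1
    simp only [pvbRun]
    rw [if_neg (by simp [hp]), if_neg (by simp [hp])]
    rcases pvDropRun_spec t c with ⟨h1, h2⟩ | ⟨d, u, h1, h2, h3⟩
    · rw [hp] at h1
      rw [e1, h1]
      simp [pvbEat, h2]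
    · rw [hp] at h1 h2; simp only [Bool.not_false] at h2
      have e2 := pvbEat_cons d u
      rw [h2] at e2
      rw [e1, h1]
      simp only [Option.bind]
      rcases pvDropRun_spec u d with ⟨g1, g2⟩ | ⟨d2, u2, g1, g2, g3⟩
      · rw [h2] at g1
        rw [e2, g1]
        simp [pvbEat, h3, g2]
      · rw [h2] at g1 g2; simp only [Bool.not_true] at g2
        have e3 := pvbEat_cons d2 u2
        rw [g2] at e3
        rw [e2, g1]
        simp only [Option.bind]
        rcases pvDropRun_spec u2 d2 with ⟨f1, f2⟩ | ⟨d3, u3, f1, f2, f3⟩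
        · rw [g2] at f1
          rw [e3, f1]
          simp [pvbEat, h3, g3, f2]
        · rw [g2] at f1 f2; simp only [Bool.not_false] at f2
          have e4 := pvbEat_cons d3 u3
          rw [f2] at e4
          rw [e3, f1]
          rcases pvDropRun_spec u3 d3 with ⟨k1, k2⟩ | ⟨d4, u4, k1, k2, k3⟩
          · rw [f2] at k1
            simp only [e4, k1]
            simp [h3, g3, f3, k2]
          · rw [f2] at k1 k2; simp only [Bool.not_true] at k2
            simp only [e4, k1]
            simp [h3, g3, f3, k3]
  · -- vowel start: V+ C+ [V+]
    have e1 := pvbEat_cons c t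
    rw [hp] at e1
    simp only [pvbRun]
    rw [if_pos hp]
    rcases pvDropRun_spec t c with ⟨h1, h2⟩ | ⟨d, u, h1, h2, h3⟩
    · rw [hp] at h1
      rw [e1, h1]
      simp [pvbEat, h2]
    · rw [hp] at h1 h2; simp only [Bool.not_true] at h2
      have e2 := pvbEat_cons d u
      rw [h2] at e2
      rw [e1, h1]
      simp only [Option.bind]
      rcases pvDropRun_spec u d with ⟨g1, g2⟩ | ⟨d2, u2, g1, g2, g3⟩
      · rw [h2] at g1
        rw [e2, g1]
        simp [pvbEat, h3, g2]
      · rw [h2] at g1 g2; simp only [Bool.not_false] at g2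
        have e3 := pvbEat_cons d2 u2
        rw [g2] at e3
        rw [e2, g1]
        rcases pvDropRun_spec u2 d2 with ⟨f1, f2⟩ | ⟨d3, u3, f1, f2, f3⟩
        · rw [g2] at f1
          simp only [e3, f1]
          simp [h3, g3, f2]
        · rw [g2] at f1 f2; simp only [Bool.not_true] at f2
          simp only [e3, f1]
          simp [h3, g3, f3]

-- ===== VERDICT =====
theorem is_short_word_spec : Claim_equal_is_short_word := by
  intro word _ hpre
  unfold Spec_is_short_word is_short_word
  have hl : word.toList ≠ [] := by
    intro h
    apply hpre
    have := congrArg String.ofList h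
    simpa using this
  obtain ⟨a, t, hat⟩ := List.exists_cons_of_ne_nil hl
  have hget : PySem.Str.pyGet? word 0 = some a := by
    rw [show (0 : Int) = ((0 : Nat) : Int) from rfl, PySem.Str.pyGet?_natCast, hat]; rfl
  rw [hget]
  have hlen : PySem.Str.len word = ((t.length : Int) + 1) := by
    simp [PySem.Str.len_eq, hat]
  have hA :
      ((PySem.List.pyRange 0 (PySem.Str.len word - 1) 1).foldl
        (fun acc i =>
          if (((PySem.Str.pyGet? word i).map pva_is_vowel).getD false)
             != (((PySem.Str.pyGet? word (i + 1)).map pva_is_vowel).getD false)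
          then acc + 1 else acc) (0 : Int))
        = (pvFlips (pvb_is_vowel a) t : Int) := by
    rw [hlen]
    have : ((t.length : Int) + 1 - 1) = ((t.length : Nat) : Int) := by ring
    rw [this, PySem.List.pyRange_one, List.foldl_map]
    have harg : ∀ (acc : Int) (k : Nat),
        (fun (acc : Int) (k : Nat) =>
          if (((PySem.Str.pyGet? word ((0 : Int) + (k : Int))).map pva_is_vowel).getD false)
             != (((PySem.Str.pyGet? word ((0 : Int) + (k : Int) + 1)).map pva_is_vowel).getD false)
          then acc + 1 else acc) acc k
        = (fun (acc : Int) (k : Nat) =>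
          if ((((a :: t)[k]?).map pva_is_vowel).getD false)
             != ((((a :: t)[k + 1]?).map pva_is_vowel).getD false)
          then acc + 1 else acc) acc k := by
      intro acc k
      have h1 : (0 : Int) + (k : Int) = ((k : Nat) : Int) := by ring
      simp only [h1]
      have h2 : ((k : Nat) : Int) + 1 = (((k + 1 : Nat)) : Int) := by push_cast; ring
      simp only [h2, PySem.Str.pyGet?_natCast, hat]
    rw [show ((t.length : Int) - 0).toNat = t.length from by simp]
    calc (List.range t.length).foldl
          (fun (acc : Int) (k : Nat) =>
            if (((PySem.Str.pyGet? word ((0:Int) + (k : Int))).map pva_is_vowel).getD false)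
               != (((PySem.Str.pyGet? word ((0:Int) + (k : Int) + 1)).map pva_is_vowel).getD false)
            then acc + 1 else acc) 0
        = (List.range t.length).foldl
          (fun (acc : Int) (k : Nat) =>
            if ((((a :: t)[k]?).map pva_is_vowel).getD false)
               != ((((a :: t)[k + 1]?).map pva_is_vowel).getD false)
            then acc + 1 else acc) 0 := by
          exact List.foldl_ext _ _ _ (fun acc x _ => harg acc x)
      _ = (pvFlips (pvb_is_vowel a) t : Int) := pvCount_eq t a
  have hword : word = String.ofList (a :: t) := by
    rw [← hat]; simp
  rw [hword] at hA ⊢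
  show _ = pvbRun ((String.ofList (a :: t)).toList)
  rw [show ((String.ofList (a :: t)).toList) = a :: t from by simp, pvB_char a t]
  simp only [hA]
  have hv : pva_is_vowel a = pvb_is_vowel a := rfl
  rw [hv]
  have hFL : pvFlipsL (a :: t) = pvFlips (pvb_is_vowel a) t := rfl
  rw [hFL]
  have hbeq : ∀ (F k : Nat), (((F : Nat) : Int) == ((k : Nat) : Int)) = (F == k) := by
    intro F k
    by_cases h : F = k
    · simp [h]
    · have h2 : (F : Int) ≠ (k : Int) := by exact_mod_cast h
      simp [h, h2]
  cases hc : pvb_is_vowel a <;>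
    simp only [hc, Bool.not_false, Bool.not_true, if_true, if_false, ite_true, ite_false,
      Bool.false_eq_true, Bool.true_eq_false, show (1:Int)=((1:Nat):Int) from rfl,
      show (2:Int)=((2:Nat):Int) from rfl, show (3:Int)=((3:Nat):Int) from rfl, hbeq]
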